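-- pv_equiv track=rewrite | github.com/VaHerinckx/LifeLog_Project | src/sources_processing/garmin/garmin_processing.py | generate_to_format_columns
-- ===== SOURCE A (Python) =====
-- def generate_to_format_columns(columns):
--     """Function to generate lists of columns based on their units"""
--     col_duration = []
--     col_speed = []
--     col_distance = []
--
--     for column in columns:
--         if '__' not in column or len(column.split('__')) != 2:
--             continue
--
--         unit = column.split('__')[1]
--         if unit == 'MILLISECOND':
--             col_duration.append(column)
--         elif unit == 'CENTIMETERS_PER_MILLISECOND':
--             col_speed.append(column)
--         elif unit == 'CENTIMETER':
--             col_distance.append(column)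
--
--     return col_duration, col_speed, col_distance
-- ===== SOURCE B (Python) =====
-- def generate_to_format_columns(columns):
--     """Three independent filter passes, one per unit suffix (no shared dispatch loop)."""
--     def cols_with_unit(unit):
--         return [c for c in columns if c.split('__')[1:] == [unit]]
--     return (cols_with_unit('MILLISECOND'),
--             cols_with_unit('CENTIMETERS_PER_MILLISECOND'),
--             cols_with_unit('CENTIMETER'))
-- ===== Notes on version B (the rewrite author's own statement) =====
-- stated objective: idiomatic
-- what changed: Replaces A's single loop that dispatches via if/elif into three named accumulators by three independent filter comprehensions, one per unit, each selecting columns whose split('__')[1:] equals that one-element unit list (which encodes both the exactly-two-parts condition and the suffix match).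
import Mathlib
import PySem

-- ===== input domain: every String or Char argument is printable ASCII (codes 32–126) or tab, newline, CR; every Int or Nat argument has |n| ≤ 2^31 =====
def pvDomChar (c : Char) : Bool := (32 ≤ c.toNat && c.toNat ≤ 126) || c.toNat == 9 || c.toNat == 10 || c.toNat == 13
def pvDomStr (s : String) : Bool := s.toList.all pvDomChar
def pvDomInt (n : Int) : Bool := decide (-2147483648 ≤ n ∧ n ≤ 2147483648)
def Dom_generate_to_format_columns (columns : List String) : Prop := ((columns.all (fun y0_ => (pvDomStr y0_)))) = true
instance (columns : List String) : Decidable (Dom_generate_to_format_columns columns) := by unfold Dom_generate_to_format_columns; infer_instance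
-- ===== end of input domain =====

-- B replaces A's single dispatch loop (if/elif into three named accumulators) by three
-- independent filter passes, one per unit suffix (idiomatic restructuring; same cost).


-- ===== PORT A =====
-- loop body of A: skip unless '__' in column and the split has exactly 2 parts,
-- then append to the accumulator named by the unit suffix
def pvStepA (acc : List String × List String × List String) (column : String) :
    List String × List String × List String :=
  if (!PySem.Str.isIn "__" column) || ((PySem.Str.split? column "__").getD []).length != 2 then
    acc
  else
    -- column.split('__')[1]: in range here since the guard ensures 2 parts (getD "" is never hit)
    let unit := PySem.List.pyGetD ((PySem.Str.split? column "__").getD []) 1 ""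
    if unit = "MILLISECOND" then (acc.1 ++ [column], acc.2.1, acc.2.2)
    else if unit = "CENTIMETERS_PER_MILLISECOND" then (acc.1, acc.2.1 ++ [column], acc.2.2)
    else if unit = "CENTIMETER" then (acc.1, acc.2.1, acc.2.2 ++ [column])
    else acc

def generate_to_format_columns (columns : List String) : List String × List String × List String :=
  columns.foldl pvStepA ([], [], [])

-- ===== PORT B =====
-- cols_with_unit: the comprehension [c for c in columns if c.split('__')[1:] == [unit]]
def pvColsWithUnit (columns : List String) (unit : String) : List String :=
  columns.filter (fun c =>
    PySem.List.slice ((PySem.Str.split? c "__").getD []) (some 1) none == [unit])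

def generate_to_format_columns_alt (columns : List String) : List String × List String × List String :=
  (pvColsWithUnit columns "MILLISECOND",
   pvColsWithUnit columns "CENTIMETERS_PER_MILLISECOND",
   pvColsWithUnit columns "CENTIMETER")

-- ===== PRECONDITION & SPEC =====
def Spec_generate_to_format_columns (columns : List String) (out : List String × List String × List String) : Prop := out = generate_to_format_columns_alt columns
instance (columns : List String) (out : List String × List String × List String) : Decidable (Spec_generate_to_format_columns columns out) := by unfold Spec_generate_to_format_columns; infer_instance

-- ===== CLAIM (what is proved, stated in full; the proofs are below) =====
def Claim_equal_generate_to_format_columns : Prop := ∀ (columns : List String), Dom_generate_to_format_columns columns → Spec_generate_to_format_columns columns (generate_to_format_columns columns)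

-- ===== LEMMAS AND PROOFS =====

-- splitOn.go without any separator occurrence just moves the whole input into the current piece
theorem pv_go_no_match (sep : List Char) (fuel : Nat) :
    ∀ (l cur : List Char) (acc : List (List Char)),
      (∀ t, t <:+ l → sep.isPrefixOf t = false) →
      PySem.Chars.splitOn.go sep fuel l cur acc = ((cur.reverse ++ l) :: acc).reverse := by
  induction fuel with
  | zero => intro l cur acc _; rfl
  | succ n ih =>
      intro l cur acc h
      cases l with
      | nil => simp [PySem.Chars.splitOn.go]
      | cons c rest =>
          have hpre : sep.isPrefixOf (c :: rest) = false := h _ (List.suffix_refl _)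
          have := ih rest (c :: cur) acc (fun t ht => h t (ht.trans (List.suffix_cons c rest)))
          simp only [PySem.Chars.splitOn.go, hpre, Bool.false_eq_true, if_false]
          rw [this]; simp

-- if '__' does not occur in the column, split('__') yields exactly one piece
theorem pv_split_no_sep (column : String) (h : PySem.Str.isIn "__" column = false) :
    (PySem.Str.split? column "__").getD [] = [column] := by
  have hinf : ¬ ("__".toList <:+: column.toList) :=
    (PySem.Chars.isIn_eq_false_iff _ _).mp h
  have hnp : ∀ t, t <:+ column.toList → ("__".toList).isPrefixOf t = false := by
    intro t ht
    by_contra hb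
    have hp : "__".toList <+: t := List.isPrefixOf_iff_prefix.mp (by
      cases hpf : ("__".toList).isPrefixOf t
      · exact absurd hpf hb
      · rfl)
    exact hinf (hp.isInfix.trans ht.isInfix)
  have e : ("__".toList : List Char) = ['_', '_'] := rfl
  rw [e] at hnp
  have hgo : PySem.Chars.splitOn column.toList ['_', '_'] = [column.toList] := by
    unfold PySem.Chars.splitOn
    rw [pv_go_no_match _ _ _ _ _ hnp]; simp
  simp [PySem.Str.split?, PySem.Chars.split?, hgo]

-- cons step of each of B's filters
theorem pv_cols_cons (c : String) (cs : List String) (u : String) :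
    pvColsWithUnit (c :: cs) u =
      (if PySem.List.slice ((PySem.Str.split? c "__").getD []) (some 1) none = [u]
       then c :: pvColsWithUnit cs u else pvColsWithUnit cs u) := by
  simp [pvColsWithUnit, List.filter_cons]

-- the loop invariant: A's fold from (d, s, di) appends exactly B's three filters
theorem pv_loop_inv (cols : List String) :
    ∀ (d s di : List String),
      cols.foldl pvStepA (d, s, di) =
        (d ++ pvColsWithUnit cols "MILLISECOND",
         s ++ pvColsWithUnit cols "CENTIMETERS_PER_MILLISECOND",
         di ++ pvColsWithUnit cols "CENTIMETER") := by
  induction cols with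
  | nil => intro d s di; simp [pvColsWithUnit]
  | cons c cs ih =>
      intro d s di
      rw [List.foldl_cons]
      set parts := (PySem.Str.split? c "__").getD [] with hparts
      have htail : PySem.List.slice parts (some 1) none = parts.tail :=
        PySem.List.slice_from_one parts
      by_cases hlen : parts.length = 2
      · obtain ⟨a, b, hab⟩ := List.length_eq_two.mp hlen
        have hin : PySem.Str.isIn "__" c = true := by
          cases hi : PySem.Str.isIn "__" c
          · rw [pv_split_no_sep c hi] at hparts
            rw [hparts] at hab; simp at hab
          · rfl
        have hget : PySem.List.pyGetD parts 1 "" = b := by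
          rw [hab]; simp [PySem.List.pyGetD, PySem.List.pyGet?, PySem.List.pyIdx?]
        have hstep : pvStepA (d, s, di) c =
            (if b = "MILLISECOND" then (d ++ [c], s, di)
             else if b = "CENTIMETERS_PER_MILLISECOND" then (d, s ++ [c], di)
             else if b = "CENTIMETER" then (d, s, di ++ [c]) else (d, s, di)) := by
          simp only [pvStepA, hin, ← hparts, hlen, Bool.not_true, Bool.false_or,
            bne_self_eq_false, Bool.false_eq_true, if_false, hget]
        have hsl : ∀ u : String,
            (PySem.List.slice parts (some 1) none = [u]) ↔ b = u := by
          intro u; rw [htail, hab]; simp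
        rw [hstep, ih, pv_cols_cons, pv_cols_cons, pv_cols_cons, ← hparts]
        by_cases h1 : b = "MILLISECOND"
        · simp [hsl, h1]
        · by_cases h2 : b = "CENTIMETERS_PER_MILLISECOND"
          · simp [hsl, h2]
          · by_cases h3 : b = "CENTIMETER"
            · simp [hsl, h3]
            · simp [hsl, h1, h2, h3]
      · have hA : pvStepA (d, s, di) c = (d, s, di) := by
          simp [pvStepA, ← hparts, hlen]
        have hsl : ∀ u : String,
            ¬ (PySem.List.slice parts (some 1) none = [u]) := by
          intro u hu
          rw [htail] at hu
          have : parts.tail.length = 1 := by rw [hu]; rfl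
          rcases parts with _ | ⟨x, xs⟩
          · simp at this
          · simp at this; simp [this] at hlen
        rw [hA, ih, pv_cols_cons, pv_cols_cons, pv_cols_cons, ← hparts]
        simp [hsl]

-- ===== VERDICT (by name: the statement is the Claim_ definition above) =====
theorem generate_to_format_columns_spec : Claim_equal_generate_to_format_columns := by
  intro columns _
  unfold Spec_generate_to_format_columns generate_to_format_columns generate_to_format_columns_alt
  simpa using pv_loop_inv columns [] [] []
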